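-- pv_equiv track=rewrite | github.com/eduardo-559/desafios-de-programacao | binary-search/queries_about_less_or_equal_elements.py | queries_less_or_equal
-- ===== SOURCE A (Python) =====
-- def queries_less_or_equal(a, b):
--     # Ordenar a lista 'a' para as buscas binárias
--     a.sort()
--
--     # Função para contar elementos em 'a' que são menores ou iguais a 'x'
--     def binary_search(x):
--         lo, hi = 0, len(a)
--         while lo < hi:
--             mid = (lo + hi) // 2
--             if a[mid] <= x:
--                 lo = mid + 1
--             else:
--                 hi = mid
--         return lo
--
--     # Lista para manter os resultados
--     result = []
--     # Para cada elemento em 'b', faz a busca binária em 'a'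
--     for x in b:
--         result.append(binary_search(x))
--
--     return result
-- ===== SOURCE B (Python) =====
-- def queries_less_or_equal(a, b):
--     # Same side effect as A: sorts 'a' in place.
--     a.sort()
--     # One linear count per query instead of a hand-rolled binary search.
--     return [sum(v <= x for v in a) for x in b]
-- ===== Notes on version B (the rewrite author's own statement) =====
-- stated objective: simpler
-- what changed: Replaces the hand-written binary-search-per-query with a direct linear count of elements <= x per query (a two-line comprehension); 'a' is still sorted in place to preserve A's mutation side effect.
import Mathlib
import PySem

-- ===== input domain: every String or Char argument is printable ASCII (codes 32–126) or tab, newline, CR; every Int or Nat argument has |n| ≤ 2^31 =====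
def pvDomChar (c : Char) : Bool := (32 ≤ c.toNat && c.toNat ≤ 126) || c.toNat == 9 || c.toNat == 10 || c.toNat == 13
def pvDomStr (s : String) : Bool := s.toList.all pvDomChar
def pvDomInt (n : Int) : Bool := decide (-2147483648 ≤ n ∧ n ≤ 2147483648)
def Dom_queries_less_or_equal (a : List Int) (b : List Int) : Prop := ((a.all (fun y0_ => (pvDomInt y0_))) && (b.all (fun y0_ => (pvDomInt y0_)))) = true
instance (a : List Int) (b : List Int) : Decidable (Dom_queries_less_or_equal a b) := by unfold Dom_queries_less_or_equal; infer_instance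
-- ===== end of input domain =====

-- B replaces A's per-query binary search by a direct linear count per query (simpler, not faster).
-- Both Pythons sort 'a' in place; the equivalence proved here is about the RETURN value.

-- ===== PORT A =====
-- the inner 'binary_search' while-loop of A (mid inlined); a[mid] is always in range
-- (0 ≤ lo ≤ mid < hi ≤ len a), so pyGetD with default 0 is exact here
def bsGo (a : List Int) (x lo hi : Int) : Int :=
  if lo < hi then
    if PySem.List.pyGetD a (PySem.Int.floordiv (lo + hi) 2) 0 ≤ x then
      bsGo a x (PySem.Int.floordiv (lo + hi) 2 + 1) hi
    else bsGo a x lo (PySem.Int.floordiv (lo + hi) 2)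
  else lo
termination_by (hi - lo).toNat
decreasing_by
  · have h := PySem.Int.floordiv_two_mid_bounds (le_of_lt (by assumption : lo < hi))
    have h2 : PySem.Int.floordiv (lo + hi) 2 < hi := by
      rw [PySem.Int.floordiv_lt_iff_lt_mul (by omega : (0:Int) < 2)]; omega
    omega
  · have h2 : PySem.Int.floordiv (lo + hi) 2 < hi := by
      rw [PySem.Int.floordiv_lt_iff_lt_mul (by omega : (0:Int) < 2)]; omega
    omega

def queries_less_or_equal (a : List Int) (b : List Int) : List Int :=
  let s := PySem.List.sorted a (fun v => v)
  b.foldl (fun result x => result ++ [bsGo s x 0 (s.length : Int)]) []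

-- ===== PORT B =====
def queries_less_or_equal_alt (a : List Int) (b : List Int) : List Int :=
  let s := PySem.List.sorted a (fun v => v)
  b.map (fun x => s.foldl (fun acc v => if v ≤ x then acc + 1 else acc) 0)

-- ===== PRECONDITION & SPEC =====
def Spec_queries_less_or_equal (a : List Int) (b : List Int) (out : List Int) : Prop := out = queries_less_or_equal_alt a b
instance (a : List Int) (b : List Int) (out : List Int) : Decidable (Spec_queries_less_or_equal a b out) := by unfold Spec_queries_less_or_equal; infer_instance

-- ===== CLAIM (what is proved, stated in full; the proofs are below) =====
def Claim_equal_queries_less_or_equal : Prop := ∀ (a : List Int) (b : List Int), Dom_queries_less_or_equal a b → Spec_queries_less_or_equal a b (queries_less_or_equal a b)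

-- ===== LEMMAS AND PROOFS =====

-- invariant of A's binary-search loop on a sorted list
theorem bsGo_inv (s : List Int) (x : Int) (hs : s.Pairwise (· ≤ ·)) :
    ∀ (n : Nat) (lo hi : Int), (hi - lo).toNat = n → 0 ≤ lo → lo ≤ hi → hi ≤ (s.length : Int) →
    (∀ (j : Nat) (hj : j < s.length), (j : Int) < lo → s[j] ≤ x) →
    (∀ (j : Nat) (hj : j < s.length), hi ≤ (j : Int) → x < s[j]) →
    lo ≤ bsGo s x lo hi ∧ bsGo s x lo hi ≤ hi ∧
    (∀ (j : Nat) (hj : j < s.length), (j : Int) < bsGo s x lo hi → s[j] ≤ x) ∧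
    (∀ (j : Nat) (hj : j < s.length), bsGo s x lo hi ≤ (j : Int) → x < s[j]) := by
  intro n
  induction n using Nat.strong_induction_on with
  | _ n ih =>
    intro lo hi hn h0 hlh hhn hlow hhigh
    rw [bsGo]
    by_cases hcase : lo < hi
    · simp only [if_pos hcase]
      have hmid := PySem.Int.floordiv_two_mid_bounds (le_of_lt hcase)
      have hmlt : PySem.Int.floordiv (lo + hi) 2 < hi := by
        rw [PySem.Int.floordiv_lt_iff_lt_mul (by omega : (0:Int) < 2)]; omega
      set mid := PySem.Int.floordiv (lo + hi) 2 with hmiddef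
      have hm0 : 0 ≤ mid := by omega
      have hmlen : mid < (s.length : Int) := by omega
      have hget : PySem.List.pyGetD s mid 0 = s[mid.toNat]'(by omega) :=
        PySem.List.pyGetD_eq_getElem s 0 hm0 hmlen
      have hmono := List.pairwise_iff_getElem.mp hs
      by_cases hle : PySem.List.pyGetD s mid 0 ≤ x
      · simp only [if_pos hle]
        have hsx : s[mid.toNat]'(by omega) ≤ x := by rw [← hget]; exact hle
        have hres := ih ((hi - (mid + 1)).toNat) (by omega) (mid + 1) hi rfl (by omega)
          (by omega) hhn
          (fun j hj hjlt => by
            by_cases hjm : j < mid.toNat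
            · exact le_trans (hmono j mid.toNat hj (by omega) hjm) hsx
            · have : j = mid.toNat := by omega
              subst this; exact hsx)
          hhigh
        exact ⟨by omega, hres.2.1, hres.2.2.1, hres.2.2.2⟩
      · simp only [if_neg hle]
        have hsx : x < s[mid.toNat]'(by omega) := by rw [← hget]; omega
        have hres := ih ((mid - lo).toNat) (by omega) lo mid rfl h0 (by omega) (by omega)
          hlow
          (fun j hj hjge => by
            by_cases hjm : mid.toNat < j
            · exact lt_of_lt_of_le hsx (hmono mid.toNat j (by omega) hj hjm)
            · have : j = mid.toNat := by omega
              subst this; exact hsx)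
        exact ⟨hres.1, by omega, hres.2.2.1, hres.2.2.2⟩
    · simp only [if_neg hcase]
      exact ⟨le_refl _, by omega, hlow, fun j hj hge => hhigh j hj (by omega)⟩

-- the two-sided split characterisation pins down countP
theorem countP_of_split (s : List Int) (x : Int) (r : Int) (h0 : 0 ≤ r) (hr : r ≤ (s.length : Int))
    (hlow : ∀ (j : Nat) (hj : j < s.length), (j : Int) < r → s[j] ≤ x)
    (hhigh : ∀ (j : Nat) (hj : j < s.length), r ≤ (j : Int) → x < s[j]) :
    r = (s.countP (fun v => decide (v ≤ x)) : Int) := by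
  have hk : r.toNat ≤ s.length := by omega
  have hsplit : s = s.take r.toNat ++ s.drop r.toNat := (List.take_append_drop _ _).symm
  have htake : (s.take r.toNat).countP (fun v => decide (v ≤ x)) = (s.take r.toNat).length := by
    apply List.countP_eq_length.mpr
    intro v hv
    obtain ⟨i, hi, hgi⟩ := List.mem_iff_getElem.mp hv
    have hi' : i < r.toNat := by
      have := hi; rw [List.length_take] at this; omega
    have hilen : i < s.length := by omega
    rw [List.getElem_take] at hgi
    have hlt : (i : Int) < r := by omega
    simpa [← hgi] using hlow i hilen hlt
  have hdrop : (s.drop r.toNat).countP (fun v => decide (v ≤ x)) = 0 := by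
    apply List.countP_eq_zero.mpr
    intro v hv
    obtain ⟨i, hi, hgi⟩ := List.mem_iff_getElem.mp hv
    have hilen : r.toNat + i < s.length := by
      have := hi; rw [List.length_drop] at this; omega
    rw [List.getElem_drop] at hgi
    have hge : r ≤ ((r.toNat + i : Nat) : Int) := by push_cast; omega
    have hx := hhigh (r.toNat + i) hilen hge
    simp only [← hgi, decide_eq_true_eq]
    omega
  have hlen : (s.take r.toNat).length = r.toNat := by rw [List.length_take]; omega
  have : s.countP (fun v => decide (v ≤ x)) = r.toNat := by
    conv_lhs => rw [hsplit]
    rw [List.countP_append, hdrop, htake, hlen]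
    omega
  omega

-- on a sorted list, A's binary search computes the count of elements ≤ x
theorem bsGo_eq_countP (s : List Int) (x : Int) (hs : s.Pairwise (· ≤ ·)) :
    bsGo s x 0 (s.length : Int) = (s.countP (fun v => decide (v ≤ x)) : Int) := by
  have h := bsGo_inv s x hs ((s.length : Int) - 0).toNat 0 (s.length : Int) rfl (le_refl _)
    (by omega) (le_refl _)
    (fun j hj hjlt => absurd hjlt (by omega))
    (fun j hj hge => absurd hge (by omega))
  exact countP_of_split s x _ h.1 h.2.1 h.2.2.1 h.2.2.2

-- ===== VERDICT (by name: the statement is the Claim_ definition above) =====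
theorem queries_less_or_equal_spec : Claim_equal_queries_less_or_equal := by
  intro a b _
  unfold Spec_queries_less_or_equal queries_less_or_equal queries_less_or_equal_alt
  rw [PySem.List.foldl_append_singleton_eq_map]
  simp only [List.nil_append]
  apply List.map_congr_left
  intro x _
  have hs : (PySem.List.sorted a (fun v => v)).Pairwise (· ≤ ·) := by
    simpa using PySem.List.sorted_pairwise a (fun v => v)
  rw [bsGo_eq_countP _ _ hs,
    show (fun (acc v : Int) => if v ≤ x then acc + 1 else acc)
       = (fun (acc v : Int) => if (fun v => decide (v ≤ x)) v = true then acc + 1 else acc) from by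
      funext acc v; simp,
    PySem.List.foldl_count_if (fun v => decide (v ≤ x))]
  simp
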